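-- pv_equiv track=rewrite | github.com/carloosochoa/python | cOchoa_boletin6.py | cadena_alaquasera
-- ===== SOURCE A (Python) =====
-- def cadena_alaquasera(cadena):
--     pos_vocal = 1
--     pos_cons = 2
--     pos_num = 3
--     pos_guion = 4
--     pos = 0
--
--     for i in cadena:
--         pos += 1
--         if pos == pos_vocal:
--             pos_vocal += 4
--             if i not in ["A", "E", "I", "O", "U", "a", "e", "i", "o", "u"]:
--                 return False
--         elif pos == pos_cons:
--             pos_cons += 4
--
--             if i not in ["q", "w", "r", "t", "y", "p", "s", "d", "f", "g", "h", "j", "k", "l", "z", "x", "c", "v", "b",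
--                          "n", "m"]:
--                 return False
--         elif pos == pos_num:
--             pos_num += 4
--
--             if i not in ["0", "1", "2", "3", "4", "5", "6", "7", "8", "9"]:
--                 return False
--         elif pos == pos_guion:
--             pos_guion += 4
--             if i not in ["-"]:
--                 return False
--
--     return True
-- ===== SOURCE B (Python) =====
-- def cadena_alaquasera(cadena):
--     # Consume the string in 4-character vowel-consonant-digit-hyphen blocks:
--     # each round checks one unrolled block with an early-return chain (stopping
--     # at the end of a partial final block) and keeps only the remainder.
--     # No counters, no position arithmetic, no dispatch.
--     resto = cadena
--     while resto:
--         if resto[0] not in "AEIOUaeiou":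
--             return False
--         if len(resto) == 1:
--             return True
--         if resto[1] not in "qwrtypsdfghjklzxcvbnm":
--             return False
--         if len(resto) == 2:
--             return True
--         if resto[2] not in "0123456789":
--             return False
--         if len(resto) == 3:
--             return True
--         if resto[3] != "-":
--             return False
--         resto = resto[4:]
--     return True
-- ===== Notes on version B (the rewrite author's own statement) =====
-- stated objective: alternative
-- what changed: Replaces A's per-character loop with four independent incrementing phase counters and an elif dispatch by a loop over 4-character blocks: each round checks one unrolled vowel-consonant-digit-hyphen block with an early-return chain and then drops it, so no counters, no position arithmetic and no dispatch remain.
import Mathlib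
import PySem

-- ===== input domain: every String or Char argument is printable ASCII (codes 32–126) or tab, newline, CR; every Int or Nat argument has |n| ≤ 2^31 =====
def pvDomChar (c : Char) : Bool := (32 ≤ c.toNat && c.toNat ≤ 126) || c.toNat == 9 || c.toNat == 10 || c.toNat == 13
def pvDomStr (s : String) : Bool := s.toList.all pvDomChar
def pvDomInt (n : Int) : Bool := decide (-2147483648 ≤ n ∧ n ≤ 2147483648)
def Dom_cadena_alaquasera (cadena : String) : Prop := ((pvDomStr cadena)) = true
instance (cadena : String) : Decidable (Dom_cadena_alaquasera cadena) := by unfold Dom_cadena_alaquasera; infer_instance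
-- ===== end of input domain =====

-- B replaces A's per-character loop with four incrementing phase counters and an elif
-- dispatch by a loop over unrolled 4-character vowel-consonant-digit-hyphen blocks
-- (objective: alternative; same cost).

-- ===== PORT A =====
def pvVocales : List Char := ['A', 'E', 'I', 'O', 'U', 'a', 'e', 'i', 'o', 'u']
def pvConsonantes : List Char := ['q', 'w', 'r', 't', 'y', 'p', 's', 'd', 'f', 'g', 'h', 'j', 'k', 'l', 'z', 'x', 'c', 'v', 'b', 'n', 'm']
def pvDigitos : List Char := ['0', '1', '2', '3', '4', '5', '6', '7', '8', '9']
def pvGuion : List Char := ['-']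

-- literal transliteration of A's loop: state (pos_vocal, pos_cons, pos_num, pos_guion, pos)
def pvLoopA : List Char → Int → Int → Int → Int → Int → Bool
  | [], _, _, _, _, _ => true
  | i :: rest, pv, pc, pn, pg, pos =>
    if pos + 1 = pv then
      if i ∉ pvVocales then false else pvLoopA rest (pv + 4) pc pn pg (pos + 1)
    else if pos + 1 = pc then
      if i ∉ pvConsonantes then false else pvLoopA rest pv (pc + 4) pn pg (pos + 1)
    else if pos + 1 = pn then
      if i ∉ pvDigitos then false else pvLoopA rest pv pc (pn + 4) pg (pos + 1)
    else if pos + 1 = pg then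
      if i ∉ pvGuion then false else pvLoopA rest pv pc pn (pg + 4) (pos + 1)
    else pvLoopA rest pv pc pn pg (pos + 1)

def cadena_alaquasera (cadena : String) : Bool :=
  pvLoopA cadena.toList 1 2 3 4 0

-- ===== PORT B =====
-- transliteration of B's while loop: the remaining characters `resto`; each round
-- checks one unrolled vowel-consonant-digit-hyphen block (the nested matches are
-- B's `len(resto) == k` early returns) and continues with resto[4:].
def pvLoopB : List Char → Bool
  | [] => true
  | v :: t1 =>
    if v ∉ "AEIOUaeiou".toList then false
    else match t1 with
      | [] => true
      | c :: t2 =>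
        if c ∉ "qwrtypsdfghjklzxcvbnm".toList then false
        else match t2 with
          | [] => true
          | d :: t3 =>
            if d ∉ "0123456789".toList then false
            else match t3 with
              | [] => true
              | g :: rest => if g ≠ '-' then false else pvLoopB rest

def cadena_alaquasera_alt (cadena : String) : Bool :=
  pvLoopB cadena.toList

-- ===== PRECONDITION & SPEC =====
def Spec_cadena_alaquasera (cadena : String) (out : Bool) : Prop := out = cadena_alaquasera_alt cadena
instance (cadena : String) (out : Bool) : Decidable (Spec_cadena_alaquasera cadena out) := by unfold Spec_cadena_alaquasera; infer_instance

-- ===== CLAIM =====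
def Claim_equal_cadena_alaquasera : Prop := ∀ (cadena : String), Dom_cadena_alaquasera cadena → Spec_cadena_alaquasera cadena (cadena_alaquasera cadena)

-- ===== LEMMAS AND PROOFS =====
theorem hVoc : "AEIOUaeiou".toList = pvVocales := by decide
theorem hCons : "qwrtypsdfghjklzxcvbnm".toList = pvConsonantes := by decide
theorem hDig : "0123456789".toList = pvDigitos := by decide

theorem pvLoopB_nv (v : Char) (rest : List Char) (h : ¬ v ∈ pvVocales) :
    pvLoopB (v :: rest) = false := by
  cases rest with
  | nil => rw [pvLoopB.eq_2, hVoc, if_pos h]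
  | cons c t => cases t with
    | nil => rw [pvLoopB.eq_3, hVoc, if_pos h]
    | cons d t2 => cases t2 with
      | nil => rw [pvLoopB.eq_4, hVoc, if_pos h]
      | cons g r => rw [pvLoopB.eq_5, hVoc, if_pos h]

theorem pvLoopB_nc (v c : Char) (rest : List Char) (hv : v ∈ pvVocales)
    (h : ¬ c ∈ pvConsonantes) : pvLoopB (v :: c :: rest) = false := by
  cases rest with
  | nil => rw [pvLoopB.eq_3, hVoc, hCons, if_neg (fun hh => hh hv), if_pos h]
  | cons d t => cases t with
    | nil => rw [pvLoopB.eq_4, hVoc, hCons, if_neg (fun hh => hh hv), if_pos h]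
    | cons g r => rw [pvLoopB.eq_5, hVoc, hCons, if_neg (fun hh => hh hv), if_pos h]

theorem pvLoopB_nd (v c d : Char) (rest : List Char) (hv : v ∈ pvVocales)
    (hc : c ∈ pvConsonantes) (h : ¬ d ∈ pvDigitos) :
    pvLoopB (v :: c :: d :: rest) = false := by
  cases rest with
  | nil => rw [pvLoopB.eq_4, hVoc, hCons, hDig, if_neg (fun hh => hh hv),
      if_neg (fun hh => hh hc), if_pos h]
  | cons g r => rw [pvLoopB.eq_5, hVoc, hCons, hDig, if_neg (fun hh => hh hv),
      if_neg (fun hh => hh hc), if_pos h]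

theorem pvLoopB_ng (v c d g : Char) (rest : List Char) (hv : v ∈ pvVocales)
    (hc : c ∈ pvConsonantes) (hd : d ∈ pvDigitos) (h : g ≠ '-') :
    pvLoopB (v :: c :: d :: g :: rest) = false := by
  rw [pvLoopB.eq_5, hVoc, hCons, hDig, if_neg (fun hh => hh hv),
      if_neg (fun hh => hh hc), if_neg (fun hh => hh hd), if_pos h]

theorem pvLoopB_block (v c d : Char) (rest : List Char) (hv : v ∈ pvVocales)
    (hc : c ∈ pvConsonantes) (hd : d ∈ pvDigitos) :
    pvLoopB (v :: c :: d :: '-' :: rest) = pvLoopB rest := by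
  rw [pvLoopB.eq_5, hVoc, hCons, hDig, if_neg (fun hh => hh hv),
      if_neg (fun hh => hh hc), if_neg (fun hh => hh hd),
      if_neg (by decide : ¬('-' : Char) ≠ '-')]

theorem pvLoopB_v1 (v : Char) (hv : v ∈ pvVocales) : pvLoopB [v] = true := by
  rw [pvLoopB.eq_2, hVoc, if_neg (fun hh => hh hv)]

theorem pvLoopB_v2 (v c : Char) (hv : v ∈ pvVocales) (hc : c ∈ pvConsonantes) :
    pvLoopB [v, c] = true := by
  rw [pvLoopB.eq_3, hVoc, hCons, if_neg (fun hh => hh hv), if_neg (fun hh => hh hc)]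

theorem pvLoopB_v3 (v c d : Char) (hv : v ∈ pvVocales) (hc : c ∈ pvConsonantes)
    (hd : d ∈ pvDigitos) : pvLoopB [v, c, d] = true := by
  rw [pvLoopB.eq_4, hVoc, hCons, hDig, if_neg (fun hh => hh hv),
      if_neg (fun hh => hh hc), if_neg (fun hh => hh hd)]

theorem pvLoop_eq : ∀ (l : List Char) (q : Int),
    pvLoopA l (4 * q + 1) (4 * q + 2) (4 * q + 3) (4 * q + 4) (4 * q) = pvLoopB l := by
  intro l
  induction l using pvLoopB.induct with
  | case1 => intro q; rfl
  | case2 v rest hv =>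
    intro q
    rw [hVoc] at hv
    rw [pvLoopA, if_pos rfl, if_pos hv, pvLoopB_nv v rest hv]
  | case3 v hv =>
    intro q
    rw [hVoc] at hv
    have hv' : v ∈ pvVocales := Classical.byContradiction fun hh => hv hh
    rw [pvLoopA, if_pos rfl, if_neg hv, pvLoopA, pvLoopB_v1 v hv']
  | case4 v hv c rest hc =>
    intro q
    rw [hVoc] at hv; rw [hCons] at hc
    have hv' : v ∈ pvVocales := Classical.byContradiction fun hh => hv hh
    rw [pvLoopA, if_pos rfl, if_neg hv]
    rw [pvLoopA, if_neg (by omega), if_pos (by omega), if_pos hc]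
    rw [pvLoopB_nc v c rest hv' hc]
  | case5 v hv c hc =>
    intro q
    rw [hVoc] at hv; rw [hCons] at hc
    have hv' : v ∈ pvVocales := Classical.byContradiction fun hh => hv hh
    have hc' : c ∈ pvConsonantes := Classical.byContradiction fun hh => hc hh
    rw [pvLoopA, if_pos rfl, if_neg hv]
    rw [pvLoopA, if_neg (by omega), if_pos (by omega), if_neg hc, pvLoopA]
    rw [pvLoopB_v2 v c hv' hc']
  | case6 v hv c hc d rest hd =>
    intro q
    rw [hVoc] at hv; rw [hCons] at hc; rw [hDig] at hd
    have hv' : v ∈ pvVocales := Classical.byContradiction fun hh => hv hh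
    have hc' : c ∈ pvConsonantes := Classical.byContradiction fun hh => hc hh
    rw [pvLoopA, if_pos rfl, if_neg hv]
    rw [pvLoopA, if_neg (by omega), if_pos (by omega), if_neg hc]
    rw [pvLoopA, if_neg (by omega), if_neg (by omega), if_pos (by omega), if_pos hd]
    rw [pvLoopB_nd v c d rest hv' hc' hd]
  | case7 v hv c hc d hd =>
    intro q
    rw [hVoc] at hv; rw [hCons] at hc; rw [hDig] at hd
    have hv' : v ∈ pvVocales := Classical.byContradiction fun hh => hv hh
    have hc' : c ∈ pvConsonantes := Classical.byContradiction fun hh => hc hh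
    have hd' : d ∈ pvDigitos := Classical.byContradiction fun hh => hd hh
    rw [pvLoopA, if_pos rfl, if_neg hv]
    rw [pvLoopA, if_neg (by omega), if_pos (by omega), if_neg hc]
    rw [pvLoopA, if_neg (by omega), if_neg (by omega), if_pos (by omega), if_neg hd, pvLoopA]
    rw [pvLoopB_v3 v c d hv' hc' hd']
  | case8 v hv c hc d hd g rest hg =>
    intro q
    rw [hVoc] at hv; rw [hCons] at hc; rw [hDig] at hd
    have hv' : v ∈ pvVocales := Classical.byContradiction fun hh => hv hh
    have hc' : c ∈ pvConsonantes := Classical.byContradiction fun hh => hc hh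
    have hd' : d ∈ pvDigitos := Classical.byContradiction fun hh => hd hh
    have hg' : g ∉ pvGuion := by
      intro hh
      exact hg (by revert hh; simp [pvGuion])
    rw [pvLoopA, if_pos rfl, if_neg hv]
    rw [pvLoopA, if_neg (by omega), if_pos (by omega), if_neg hc]
    rw [pvLoopA, if_neg (by omega), if_neg (by omega), if_pos (by omega), if_neg hd]
    rw [pvLoopA, if_neg (by omega), if_neg (by omega), if_neg (by omega), if_pos (by omega),
        if_pos hg']
    rw [pvLoopB_ng v c d g rest hv' hc' hd' hg]
  | case9 v hv c hc d hd g rest hg ih =>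
    intro q
    rw [hVoc] at hv; rw [hCons] at hc; rw [hDig] at hd
    have hv' : v ∈ pvVocales := Classical.byContradiction fun hh => hv hh
    have hc' : c ∈ pvConsonantes := Classical.byContradiction fun hh => hc hh
    have hd' : d ∈ pvDigitos := Classical.byContradiction fun hh => hd hh
    have hg' : g = '-' := Classical.byContradiction fun hh => hg hh
    subst hg'
    rw [pvLoopA, if_pos rfl, if_neg hv]
    rw [pvLoopA, if_neg (by omega), if_pos (by omega), if_neg hc]
    rw [pvLoopA, if_neg (by omega), if_neg (by omega), if_pos (by omega), if_neg hd]
    rw [pvLoopA, if_neg (by omega), if_neg (by omega), if_neg (by omega), if_pos (by omega)]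
    rw [if_neg (by decide : ¬(('-' : Char) ∉ pvGuion))]
    have e1 : (4*q+1+4 : Int) = 4*(q+1)+1 := by omega
    have e2 : (4*q+2+4 : Int) = 4*(q+1)+2 := by omega
    have e3 : (4*q+3+4 : Int) = 4*(q+1)+3 := by omega
    have e4 : (4*q+4+4 : Int) = 4*(q+1)+4 := by omega
    have e5 : (4*q+1+1+1+1 : Int) = 4*(q+1) := by omega
    rw [e1, e2, e3, e4, e5, ih (q+1)]
    rw [pvLoopB_block v c d rest hv' hc' hd']

-- ===== VERDICT =====
theorem cadena_alaquasera_spec : Claim_equal_cadena_alaquasera := by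
  intro cadena _
  unfold Spec_cadena_alaquasera cadena_alaquasera cadena_alaquasera_alt
  simpa using pvLoop_eq cadena.toList 0
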